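-- pv_equiv track=rewrite | github.com/jeppeter/pylib | utils.py | ec_y_map
-- ===== SOURCE A (Python) =====
-- def ec_y_map(primenum):
--     ymap = dict()
--     for k in range(primenum):
--         ci  = (k **2) % primenum
--         if ci not in ymap.keys():
--             ymap[ci] = [k]
--         else:
--             ymap[ci].append(k)
--     return ymap
-- ===== SOURCE B (Python) =====
-- def ec_y_map(primenum):
--     # Symmetry-based: k and primenum-k share a square mod primenum, so only
--     # square the lower half and mirror each bucket.
--     ymap = {}
--     if primenum <= 0:
--         return ymap
--     half = primenum // 2
--     for k in range(half + 1):
--         ymap.setdefault(k * k % primenum, []).append(k)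
--     for r in ymap:
--         roots = ymap[r]
--         ymap[r] = roots + [primenum - k for k in reversed(roots)
--                            if 0 < primenum - k < primenum and primenum - k != k]
--     return ymap
-- ===== Notes on version B (the rewrite author's own statement) =====
-- stated objective: alternative
-- what changed: B squares only the lower half of the range and completes each residue bucket by mirroring (k and primenum-k share a square mod primenum), instead of A's full-range conditional-insert loop.
import Mathlib
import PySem

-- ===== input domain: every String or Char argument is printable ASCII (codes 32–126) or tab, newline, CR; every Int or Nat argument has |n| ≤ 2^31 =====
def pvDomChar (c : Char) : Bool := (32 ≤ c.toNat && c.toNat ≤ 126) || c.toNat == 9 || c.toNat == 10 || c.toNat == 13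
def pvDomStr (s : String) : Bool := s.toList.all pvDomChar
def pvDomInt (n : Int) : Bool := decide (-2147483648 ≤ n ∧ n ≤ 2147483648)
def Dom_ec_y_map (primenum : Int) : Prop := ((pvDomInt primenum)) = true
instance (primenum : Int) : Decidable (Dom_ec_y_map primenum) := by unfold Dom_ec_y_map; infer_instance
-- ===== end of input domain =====

-- B replaces A's full-range conditional-insert loop by squaring only the lower half of the
-- range and mirroring each bucket (k and primenum-k share a square mod primenum);
-- objective: alternative (about half the modular squarings).

-- ===== PORT A =====
def ec_y_map (primenum : Int) : List (Int × List Int) :=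
  ((PySem.List.pyRange 0 primenum 1).foldl
    (fun ymap k =>
      let ci := PySem.Int.mod (k ^ 2) primenum
      if ymap.contains ci = false then ymap.insert ci [k]
      else ymap.modify ci [] (fun l => l ++ [k]))
    (PySem.Dict.empty : PySem.Dict Int (List Int))).items

-- ===== PORT B =====
def ec_y_map_alt (primenum : Int) : List (Int × List Int) :=
  if primenum ≤ 0 then (PySem.Dict.empty : PySem.Dict Int (List Int)).items
  else
    let half := PySem.Int.floordiv primenum 2
    let ymap := (PySem.List.pyRange 0 (half + 1) 1).foldl
      (fun d k => d.modify (PySem.Int.mod (k * k) primenum) [] (fun l => l ++ [k]))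
      (PySem.Dict.empty : PySem.Dict Int (List Int))
    ymap.items.map (fun p =>
      (p.1, p.2 ++ (p.2.reverse.filter (fun k =>
              decide (0 < primenum - k) && decide (primenum - k < primenum)
                && !(primenum - k == k))).map
            (fun k => primenum - k)))

-- ===== PRECONDITION & SPEC =====
def Spec_ec_y_map (primenum : Int) (out : List (Int × List Int)) : Prop := out = ec_y_map_alt primenum
instance (primenum : Int) (out : List (Int × List Int)) : Decidable (Spec_ec_y_map primenum out) := by unfold Spec_ec_y_map; infer_instance

-- ===== CLAIM (what is proved, stated in full; the proofs are below) =====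
def Claim_equal_ec_y_map : Prop := ∀ (primenum : Int), Dom_ec_y_map primenum → Spec_ec_y_map primenum (ec_y_map primenum)

-- ===== LEMMAS AND PROOFS =====

-- the key function both loops bucket by
def pvKey (n k : Int) : Int := PySem.Int.mod (k * k) n

-- empty range for non-positive stop
theorem pv_pyRange_nonpos (n : Int) (h : n ≤ 0) : PySem.List.pyRange 0 n 1 = [] := by
  simp [PySem.List.pyRange]; omega

-- A's loop body equals B's modify-shaped body
theorem pv_stepA_eq (n : Int) (d : PySem.Dict Int (List Int)) (k : Int) :
    (let ci := PySem.Int.mod (k ^ 2) n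
     if d.contains ci = false then d.insert ci [k]
     else d.modify ci [] (fun l => l ++ [k]))
    = d.modify (pvKey n k) [] (fun l => l ++ [k]) := by
  have hsq : k ^ 2 = k * k := sq k
  show (if d.contains (PySem.Int.mod (k ^ 2) n) = false then _ else _) = _
  rw [hsq]
  by_cases h : d.contains (PySem.Int.mod (k * k) n) = false
  · rw [if_pos h]
    unfold pvKey PySem.Dict.modify
    rw [PySem.Dict.getD_of_not_contains d [] h]
    rfl
  · rw [if_neg h]; rfl

-- characterization of the grouping fold
theorem pv_fold_items (n : Int) (ks : List Int) :
    ((ks.foldl (fun d k => d.modify (pvKey n k) [] (fun l => l ++ [k]))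
        (PySem.Dict.empty : PySem.Dict Int (List Int))).items)
    = (PySem.Set.ofList (ks.map (pvKey n))).map
        (fun r => (r, ks.filter (fun k => pvKey n k == r))) := by
  set D := (ks.foldl (fun d k => d.modify (pvKey n k) [] (fun l => l ++ [k]))
        (PySem.Dict.empty : PySem.Dict Int (List Int))) with hD
  have hkeys : D.keys = PySem.Set.ofList (ks.map (pvKey n)) := by
    rw [hD, PySem.Dict.keys_foldl_modify_key ks (pvKey n) [] (fun _ k => (fun l => l ++ [k]))]
    rw [PySem.Dict.keys_empty]
    rfl
  have hnodup : D.keys.Nodup := by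
    rw [hD]
    exact PySem.Dict.nodup_keys_foldl_modify_key ks (pvKey n) [] _ _
      (by rw [PySem.Dict.keys_empty]; exact List.nodup_nil)
  have hget : ∀ r : Int, D.getD r [] = ks.filter (fun k => pvKey n k == r) := by
    intro r
    have hm : D = ((ks.map (fun k => (pvKey n k, k))).foldl
        (fun d p => d.modify p.1 [] (fun l => l ++ [p.2])) PySem.Dict.empty) := by
      rw [hD, List.foldl_map]
    rw [hm, PySem.Dict.getD_foldl_modify_append]
    rw [PySem.Dict.getD_empty]
    rw [List.filter_map, List.map_map]
    have h1 : List.map ((fun (x : Int × Int) => x.2) ∘ fun k => (pvKey n k, k))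
        (List.filter ((fun (p : Int × Int) => p.1 == r) ∘ fun k => (pvKey n k, k)) ks)
        = List.map (fun (k : Int) => k) (List.filter (fun k => pvKey n k == r) ks) := rfl
    rw [h1, List.map_id_fun']; rfl
  rw [PySem.Dict.items_eq_map_keys D hnodup [], hkeys]
  exact List.map_congr_left (fun r _ => by rw [hget r])

-- square mod symmetry
theorem pv_key_mirror (n x : Int) (hn : 0 < n) : pvKey n (n - x) = pvKey n x := by
  unfold pvKey
  rw [PySem.Int.mod_eq_emod_of_pos hn, PySem.Int.mod_eq_emod_of_pos hn]
  have h : (n - x) * (n - x) = x * x + (n - 2 * x) * n := by ring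
  rw [h]; exact Int.add_mul_emod_self_right (x * x) (n - 2 * x) n

-- range bridges (n ≥ 1, N = n.toNat, H = N/2+1)
theorem pv_low_range (n : Int) (hn : 1 ≤ n) :
    PySem.List.pyRange 0 (PySem.Int.floordiv n 2 + 1) 1
    = (List.range (n.toNat / 2 + 1)).map (fun (m : Nat) => (m : Int)) := by
  have h2 : ((2 : Nat) : Int) = 2 := rfl
  have hfd : PySem.Int.floordiv n 2 = ((n.toNat / 2 : Nat) : Int) := by
    rw [← h2]
    have h : n = ((n.toNat : Nat) : Int) := (Int.toNat_of_nonneg (by omega)).symm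
    rw [h]
    exact PySem.Int.floordiv_natCast n.toNat 2
  rw [hfd]
  have h1 : ((n.toNat / 2 : Nat) : Int) + 1 = ((n.toNat / 2 + 1 : Nat) : Int) := by push_cast; ring
  rw [h1]
  exact PySem.List.pyRange_zero_natCast _

theorem pv_full_range (n : Int) (hn : 1 ≤ n) :
    PySem.List.pyRange 0 n 1 = (List.range n.toNat).map (fun (m : Nat) => (m : Int)) := by
  have h : n = ((n.toNat : Nat) : Int) := (Int.toNat_of_nonneg (by omega)).symm
  rw [h]
  exact PySem.List.pyRange_zero_natCast n.toNat

-- the upper half of the range is the mirror image of [1..u]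
theorem pv_upper_desc (n : Int) (hn : 1 ≤ n) :
    (List.range n.toNat).map (fun (m : Nat) => (m : Int))
    = (List.range (n.toNat / 2 + 1)).map (fun (m : Nat) => (m : Int))
      ++ ((List.range' 1 (n.toNat - (n.toNat / 2 + 1))).reverse).map (fun (m : Nat) => n - (m : Int)) := by
  set N := n.toNat with hN
  have hNpos : 1 ≤ N := by omega
  set H := N / 2 + 1 with hH
  have hHN : H ≤ N := by omega
  have hsplit : List.range N = List.range H ++ (List.range (N - H)).map (fun x => H + x) := by
    rw [← List.range_add]
    congr 1
    omega
  rw [hsplit, List.map_append]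
  congr 1
  apply List.ext_getElem
  · simp
  · intro i h1 h2
    simp only [List.getElem_map, List.getElem_range, List.getElem_reverse,
      List.length_range'] at *
    rw [List.getElem_range']
    have hi : i < N - H := by simpa using h1
    have hn' : n = (N : Int) := (Int.toNat_of_nonneg (by omega)).symm
    rw [hn']
    push_cast
    omega

-- the mirror filter picks exactly [1..u] out of [0..H-1]
theorem pv_nat_filter (N : Nat) (hN : 1 ≤ N) :
    (List.range (N / 2 + 1)).filter (fun m => decide (0 < m ∧ 2 * m ≠ N))
    = List.range' 1 (N - (N / 2 + 1)) := by
  set K := N / 2 with hK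
  have hmap : ∀ (u : Nat), List.range' 1 u = (List.range u).map Nat.succ := by
    intro u
    rw [List.range'_eq_map_range]
    exact List.map_congr_left (fun m _ => by omega)
  rw [List.range_succ_eq_map]
  rw [List.filter_cons]
  simp only [decide_eq_true_eq]
  rw [if_neg (by omega)]
  rw [List.filter_map]
  by_cases hpar : N % 2 = 1
  · have hu : N - (K + 1) = K := by omega
    rw [hu, hmap K]
    congr 1
    apply List.filter_eq_self.mpr
    intro m _
    simp only [Function.comp, decide_eq_true_eq]
    omega
  · have hK1 : 1 ≤ K := by omega
    have hu : N - (K + 1) = K - 1 := by omega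
    rw [hu, hmap (K - 1)]
    have hsplit : List.range K = List.range (K - 1) ++ [K - 1] := by
      rw [← List.range_succ]
      congr 1
      omega
    rw [hsplit, List.filter_append]
    have h2 : List.filter ((fun m => decide (0 < m ∧ 2 * m ≠ N)) ∘ Nat.succ) [K - 1] = [] := by
      simp only [List.filter_cons, List.filter_nil, Function.comp_apply, decide_eq_true_eq]
      rw [if_neg (by omega)]
    rw [h2, List.append_nil]
    congr 1
    apply List.filter_eq_self.mpr
    intro m hm
    rw [List.mem_range] at hm
    simp only [Function.comp_apply, decide_eq_true_eq]
    omega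

theorem pv_mirror_filter_range (n : Int) (hn : 1 ≤ n) :
    (List.range (n.toNat / 2 + 1)).filter
      (fun (m : Nat) => decide (0 < n - (m : Int)) && decide (n - (m : Int) < n) && !(n - (m : Int) == (m : Int)))
    = List.range' 1 (n.toNat - (n.toNat / 2 + 1)) := by
  set N := n.toNat with hN
  have hn' : n = (N : Int) := (Int.toNat_of_nonneg (by omega)).symm
  rw [← pv_nat_filter N (by omega)]
  apply List.filter_congr
  intro m hm
  rw [List.mem_range] at hm
  rw [Bool.eq_iff_iff]
  simp only [Bool.and_eq_true, decide_eq_true_eq, Bool.not_eq_true', beq_eq_false_iff_ne]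
  rw [hn']
  constructor
  · rintro ⟨⟨h1, h2⟩, h3⟩
    constructor
    · omega
    · intro h4; apply h3; omega
  · rintro ⟨h1, h2⟩
    refine ⟨⟨by omega, by omega⟩, ?_⟩
    intro h3
    apply h2
    omega

-- per-key bucket equality
theorem pv_bucket (n : Int) (hn : 1 ≤ n) (r : Int) :
    ((List.range n.toNat).map (fun (m : Nat) => (m : Int))).filter (fun k => pvKey n k == r)
    = (((List.range (n.toNat / 2 + 1)).map (fun (m : Nat) => (m : Int))).filter (fun k => pvKey n k == r))
      ++ ((((List.range (n.toNat / 2 + 1)).map (fun (m : Nat) => (m : Int))).filter (fun k => pvKey n k == r)).reverse.filter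
            (fun k => decide (0 < n - k) && decide (n - k < n) && !(n - k == k))).map (fun k => n - k) := by
  rw [pv_upper_desc n hn, List.filter_append]
  congr 1
  -- upper side
  rw [List.filter_map]
  have h1 : List.filter ((fun k => pvKey n k == r) ∘ fun (m : Nat) => n - (m : Int))
        (List.range' 1 (n.toNat - (n.toNat / 2 + 1))).reverse
      = List.filter (fun (m : Nat) => pvKey n (m : Int) == r)
        (List.range' 1 (n.toNat - (n.toNat / 2 + 1))).reverse := by
    apply List.filter_congr
    intro m _
    simp only [Function.comp_apply]
    rw [pv_key_mirror n (m : Int) (by omega)]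
  rw [h1, List.filter_reverse]
  -- RHS massage
  rw [List.filter_map, ← List.map_reverse, List.filter_map, List.map_map, List.filter_reverse]
  have hlist : List.filter (fun (m : Nat) => pvKey n (m : Int) == r)
        (List.range' 1 (n.toNat - (n.toNat / 2 + 1)))
      = List.filter ((fun k => decide (0 < n - k) && decide (n - k < n) && !(n - k == k)) ∘ fun (m : Nat) => (m : Int))
          (List.filter ((fun k => pvKey n k == r) ∘ fun (m : Nat) => (m : Int)) (List.range (n.toNat / 2 + 1))) := by
    rw [List.filter_filter]
    have h2 : List.filter
          (fun (m : Nat) => ((fun k => decide (0 < n - k) && decide (n - k < n) && !(n - k == k)) ∘ fun (m : Nat) => (m : Int)) m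
            && ((fun k => pvKey n k == r) ∘ fun (m : Nat) => (m : Int)) m)
          (List.range (n.toNat / 2 + 1))
        = List.filter (fun (m : Nat) => pvKey n (m : Int) == r)
            (List.filter (fun (m : Nat) => decide (0 < n - (m : Int)) && decide (n - (m : Int) < n) && !(n - (m : Int) == (m : Int)))
              (List.range (n.toNat / 2 + 1))) := by
      rw [List.filter_filter]
      apply List.filter_congr
      intro m _
      simp only [Function.comp_apply]
      exact (Bool.and_comm _ _).symm
    rw [h2, pv_mirror_filter_range n hn]
  rw [hlist]
  exact List.map_congr_left (fun m _ => rfl)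

-- update by already-present elements is the identity
theorem pv_set_update_id {s : PySem.Set Int} {xs : List Int} (h : ∀ x ∈ xs, x ∈ s) :
    PySem.Set.update s xs = s := by
  induction xs generalizing s with
  | nil => rfl
  | cons x t ih =>
      have hx : PySem.Set.add s x = s := by
        unfold PySem.Set.add
        rw [if_pos (by
          have := h x (by simp)
          simpa using this)]
      show PySem.Set.update (PySem.Set.add s x) t = s
      rw [hx]
      exact ih (fun y hy => h y (by simp [hy]))

-- key sets agree
theorem pv_keys_eq (n : Int) (hn : 1 ≤ n) :
    PySem.Set.ofList (((List.range n.toNat).map (fun (m : Nat) => (m : Int))).map (pvKey n))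
    = PySem.Set.ofList (((List.range (n.toNat / 2 + 1)).map (fun (m : Nat) => (m : Int))).map (pvKey n)) := by
  rw [pv_upper_desc n hn, List.map_append]
  set low := ((List.range (n.toNat / 2 + 1)).map (fun (m : Nat) => (m : Int))).map (pvKey n) with hlow
  set up := (((List.range' 1 (n.toNat - (n.toNat / 2 + 1))).reverse).map (fun (m : Nat) => n - (m : Int))).map (pvKey n) with hup
  have hsplit : PySem.Set.ofList (low ++ up) = PySem.Set.update (PySem.Set.ofList low) up := by
    show List.foldl PySem.Set.add PySem.Set.empty (low ++ up) = _
    rw [List.foldl_append]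
    rfl
  rw [hsplit]
  apply pv_set_update_id
  intro x hx
  rw [hup] at hx
  simp only [List.mem_map, List.mem_reverse, List.mem_range'_1] at hx
  obtain ⟨k, ⟨m, hm, rfl⟩, rfl⟩ := hx
  rw [pv_key_mirror n (m : Int) (by omega)]
  rw [PySem.Set.mem_ofList]
  rw [hlow]
  simp only [List.mem_map, List.mem_range]
  exact ⟨(m : Int), ⟨m, by omega, rfl⟩, rfl⟩

-- ===== VERDICT (by name: the statement is the Claim_ definition above) =====
theorem ec_y_map_spec : Claim_equal_ec_y_map := by
  intro n _
  unfold Spec_ec_y_map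
  by_cases hneg : n ≤ 0
  · unfold ec_y_map ec_y_map_alt
    rw [pv_pyRange_nonpos n hneg, if_pos hneg]
    rfl
  · have hpos : 1 ≤ n := by omega
    have hA : ec_y_map n
        = (PySem.Set.ofList (((List.range n.toNat).map (fun (m : Nat) => (m : Int))).map (pvKey n))).map
            (fun r => (r, ((List.range n.toNat).map (fun (m : Nat) => (m : Int))).filter (fun k => pvKey n k == r))) := by
      unfold ec_y_map
      have hstep : (PySem.List.pyRange 0 n 1).foldl
          (fun ymap k =>
            let ci := PySem.Int.mod (k ^ 2) n
            if ymap.contains ci = false then ymap.insert ci [k]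
            else ymap.modify ci [] (fun l => l ++ [k]))
          (PySem.Dict.empty : PySem.Dict Int (List Int))
          = (PySem.List.pyRange 0 n 1).foldl
              (fun d k => d.modify (pvKey n k) [] (fun l => l ++ [k])) PySem.Dict.empty :=
        PySem.List.foldl_congr_mem _ _ _ _ (fun acc x _ => pv_stepA_eq n acc x)
      rw [hstep, pv_full_range n hpos, pv_fold_items n _]
    have hB : ec_y_map_alt n
        = (PySem.Set.ofList (((List.range (n.toNat / 2 + 1)).map (fun (m : Nat) => (m : Int))).map (pvKey n))).map
            (fun r =>
              (r, (((List.range (n.toNat / 2 + 1)).map (fun (m : Nat) => (m : Int))).filter (fun k => pvKey n k == r))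
                ++ (((((List.range (n.toNat / 2 + 1)).map (fun (m : Nat) => (m : Int))).filter (fun k => pvKey n k == r)).reverse.filter
                      (fun k => decide (0 < n - k) && decide (n - k < n) && !(n - k == k))).map (fun k => n - k)))) := by
      unfold ec_y_map_alt
      rw [if_neg (by omega)]
      show (((PySem.List.pyRange 0 (PySem.Int.floordiv n 2 + 1) 1).foldl
          (fun d k => d.modify (pvKey n k) [] (fun l => l ++ [k]))
          (PySem.Dict.empty : PySem.Dict Int (List Int))).items).map
          (fun p => (p.1, p.2 ++ (p.2.reverse.filter (fun k =>
              decide (0 < n - k) && decide (n - k < n) && !(n - k == k))).map (fun k => n - k))) = _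
      rw [pv_low_range n hpos, pv_fold_items n _, List.map_map]
      rfl
    rw [hA, hB, pv_keys_eq n hpos]
    exact List.map_congr_left (fun r _ => by rw [pv_bucket n hpos r])
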